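-- pv_equiv track=rewrite | github.com/johnmichaelwebb/sleep-code | MCH:HCRT/LocalResources/dataWrangling.py | mouse_indexes
-- ===== SOURCE A (Python) =====
-- def singMouseID(a, label):
--     ID = []
--     for i in range(len(a)):
--         if a[i] == label:
--             ID.append(i)
--     return ID
--
-- def mouse_indexes(a):
--     mouseID = []
--     for i in range(len(a)-1):
--         if a[i+1] not in mouseID:
--             mouseID.append(a[i+1])
--     mouseIndex = []
--     for i in range(len(mouseID)):
--         currIndex = singMouseID(a, mouseID[i])
--         mouseIndex.append(currIndex)
--     return mouseIndex
-- ===== SOURCE B (Python) =====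
-- def mouse_indexes(a):
--     pos = {}
--     for i, v in enumerate(a):
--         pos.setdefault(v, []).append(i)
--     seen = set()
--     out = []
--     for v in a[1:]:
--         if v not in seen:
--             seen.add(v)
--             out.append(pos[v])
--     return out
-- ===== Notes on version B (the rewrite author's own statement) =====
-- stated objective: faster
-- what changed: One pass builds a dict mapping each value to all its indices, then a single seen-set scan over a[1:] emits each new value's index list, replacing A's per-distinct-value rescan of the whole array.
import Mathlib
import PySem

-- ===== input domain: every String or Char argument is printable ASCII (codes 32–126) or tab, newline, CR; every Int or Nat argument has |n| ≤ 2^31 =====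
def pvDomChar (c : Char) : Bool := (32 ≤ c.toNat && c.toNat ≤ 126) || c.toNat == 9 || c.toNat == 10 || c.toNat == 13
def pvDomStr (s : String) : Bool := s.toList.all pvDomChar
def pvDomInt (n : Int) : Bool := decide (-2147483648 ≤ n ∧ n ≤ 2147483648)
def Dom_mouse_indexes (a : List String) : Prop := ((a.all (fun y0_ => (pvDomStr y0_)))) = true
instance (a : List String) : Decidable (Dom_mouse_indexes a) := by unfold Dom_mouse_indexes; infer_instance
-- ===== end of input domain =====

-- B replaces A's per-distinct-value rescan of the whole array by one dict pass plus a seen-set scan (faster).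


-- ===== PORT A =====
def singMouseID (a : List String) (label : String) : List Int :=
  (PySem.List.pyRange 0 (PySem.List.len a)).foldl
    (fun ID i => if PySem.List.pyGetD a i "" = label then ID ++ [i] else ID) []

def mouse_indexes (a : List String) : List (List Int) :=
  let mouseID := (PySem.List.pyRange 0 (PySem.List.len a - 1)).foldl
    (fun mouseID i =>
      if PySem.List.pyGetD a (i + 1) "" ∉ mouseID then mouseID ++ [PySem.List.pyGetD a (i + 1) ""]
      else mouseID) []
  (PySem.List.pyRange 0 (PySem.List.len mouseID)).foldl
    (fun mouseIndex i => mouseIndex ++ [singMouseID a (PySem.List.pyGetD mouseID i "")]) []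

-- ===== PORT B =====
def mouse_indexes_alt (a : List String) : List (List Int) :=
  let pos := (PySem.List.enumerate a).foldl
    (fun (d : PySem.Dict String (List Int)) iv => d.insert iv.2 (d.getD iv.2 [] ++ [iv.1]))
    PySem.Dict.empty
  let st := (PySem.List.slice a (some 1) none).foldl
    (fun (st : PySem.Set String × List (List Int)) v =>
      if v ∉ st.1 then (st.1.add v, st.2 ++ [pos.getD v []]) else st)
    (PySem.Set.ofList [], [])
  st.2

-- ===== PRECONDITION & SPEC =====
def Spec_mouse_indexes (a : List String) (out : List (List Int)) : Prop := out = mouse_indexes_alt a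
instance (a : List String) (out : List (List Int)) : Decidable (Spec_mouse_indexes a out) := by unfold Spec_mouse_indexes; infer_instance

-- ===== CLAIM (what is proved, stated in full; the proofs are below) =====
def Claim_equal_mouse_indexes : Prop := ∀ (a : List String), Dom_mouse_indexes a → Spec_mouse_indexes a (mouse_indexes a)

-- ===== LEMMAS AND PROOFS =====

-- B's dict pass, named for the proofs (same expression as the `let pos` in the port of B)
def posFold (a : List String) : PySem.Dict String (List Int) :=
  (PySem.List.enumerate a).foldl
    (fun (d : PySem.Dict String (List Int)) iv => d.insert iv.2 (d.getD iv.2 [] ++ [iv.1]))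
    PySem.Dict.empty

theorem pyRange_one_eq (m : Nat) :
    PySem.List.pyRange 1 ((m : Int) + 1) = (List.range m).map (fun k : Nat => ((k : Int) + 1)) := by
  induction m with
  | zero => rfl
  | succ n ih =>
      rw [show ((n + 1 : Nat) : Int) + 1 = ((n : Int) + 1) + 1 by push_cast; ring,
        PySem.List.pyRange_one_succ_right (by omega), ih, List.range_succ, List.map_append]
      simp

theorem shift_pyRange (n : Nat) :
    (PySem.List.pyRange 0 ((n : Int) - 1)).map (fun i => i + 1) = PySem.List.pyRange 1 (n : Int) := by
  cases n with
  | zero => rfl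
  | succ m =>
      rw [show ((m + 1 : Nat) : Int) - 1 = (m : Int) by push_cast; ring,
        PySem.List.pyRange_zero_natCast,
        show ((m + 1 : Nat) : Int) = (m : Int) + 1 by push_cast; ring,
        pyRange_one_eq, List.map_map]
      rfl

theorem sing_append (ys : List String) (y v : String) :
    singMouseID (ys ++ [y]) v
      = singMouseID ys v ++ (if y = v then [(ys.length : Int)] else []) := by
  have hlen : PySem.List.len (ys ++ [y]) = (ys.length : Int) + 1 := by
    simp [PySem.List.len]
  unfold singMouseID
  rw [hlen, PySem.List.pyRange_one_succ_right (by omega), List.foldl_append]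
  have hcongr :
      (PySem.List.pyRange 0 ((ys.length : Int))).foldl
        (fun ID i => if PySem.List.pyGetD (ys ++ [y]) i "" = v then ID ++ [i] else ID) []
      = (PySem.List.pyRange 0 (PySem.List.len ys)).foldl
        (fun ID i => if PySem.List.pyGetD ys i "" = v then ID ++ [i] else ID) [] := by
    rw [show PySem.List.len ys = (ys.length : Int) by simp [PySem.List.len]]
    apply PySem.List.foldl_congr_mem
    intro acc x hx
    rw [PySem.List.mem_pyRange_one] at hx
    rw [PySem.List.pyGetD_eq_getElem (ys ++ [y]) "" hx.1 (by simp; omega),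
      PySem.List.pyGetD_eq_getElem ys "" hx.1 (by omega),
      List.getElem_append_left (by omega)]
  rw [hcongr]
  have hy : PySem.List.pyGetD (ys ++ [y]) (ys.length : Int) "" = y := by
    rw [PySem.List.pyGetD_eq_getElem (ys ++ [y]) "" (by omega) (by simp)]
    simp
  simp only [List.foldl_cons, List.foldl_nil, hy]
  by_cases h : y = v <;> simp [h]

theorem pos_append (ys : List String) (y v : String) :
    (posFold (ys ++ [y])).getD v []
      = if v = y then (posFold ys).getD y [] ++ [(ys.length : Int)]
        else (posFold ys).getD v [] := by
  unfold posFold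
  rw [PySem.List.enumerate_append, List.foldl_append]
  simp only [PySem.List.enumerate, List.foldl_cons, List.foldl_nil, zero_add]
  rw [PySem.Dict.getD_insert]

theorem getD_posFold (a : List String) : ∀ v, (posFold a).getD v [] = singMouseID a v := by
  induction a using List.reverseRecOn with
  | nil => intro v; rfl
  | append_singleton ys y ih =>
      intro v
      rw [pos_append, sing_append]
      by_cases h : v = y
      · subst h; simp [ih]
      · rw [if_neg h, if_neg (mt Eq.symm h), ih, List.append_nil]

theorem bloop (f : String → List Int) (l : List String) :
    ∀ (seen : PySem.Set String) (acc : List String) (out : List (List Int)),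
    (∀ v, v ∈ seen ↔ v ∈ acc) → out = acc.map f →
    (l.foldl (fun (st : PySem.Set String × List (List Int)) v =>
        if v ∉ st.1 then (st.1.add v, st.2 ++ [f v]) else st) (seen, out)).2
      = (l.foldl (fun acc v => if v ∉ acc then acc ++ [v] else acc) acc).map f := by
  induction l with
  | nil => intro seen acc out hmem hout; simpa using hout
  | cons x xs ih =>
      intro seen acc out hmem hout
      simp only [List.foldl_cons]
      by_cases hx : x ∈ acc
      · have hseen : x ∈ seen := (hmem x).mpr hx
        rw [if_neg (not_not_intro hseen), if_neg (not_not_intro hx)]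
        exact ih seen acc out hmem hout
      · have hs : x ∉ seen := fun h => hx ((hmem x).mp h)
        rw [if_pos hs, if_pos hx]
        apply ih
        · intro v
          rw [PySem.Set.mem_add]
          constructor
          · rintro (h | rfl)
            · exact List.mem_append_left _ ((hmem v).mp h)
            · simp
          · intro h
            rcases List.mem_append.mp h with h | h
            · exact Or.inl ((hmem v).mpr h)
            · simp at h; exact Or.inr h
        · simp [hout]

theorem a_side (a : List String) :
    mouse_indexes a
      = ((a.drop 1).foldl (fun acc v => if v ∉ acc then acc ++ [v] else acc) []).map
          (fun v => singMouseID a v) := by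
  have hlen : PySem.List.len a = (a.length : Int) := by simp [PySem.List.len]
  have h1 :
      (PySem.List.pyRange 0 (PySem.List.len a - 1)).foldl
        (fun mouseID i =>
          if PySem.List.pyGetD a (i + 1) "" ∉ mouseID then mouseID ++ [PySem.List.pyGetD a (i + 1) ""]
          else mouseID) []
      = (a.drop 1).foldl (fun acc v => if v ∉ acc then acc ++ [v] else acc) [] := by
    rw [hlen]
    have h1a := (List.foldl_map (f := fun i : Int => i + 1)
      (g := fun (acc : List String) (j : Int) =>
        if PySem.List.pyGetD a j "" ∉ acc then acc ++ [PySem.List.pyGetD a j ""] else acc)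
      (l := PySem.List.pyRange 0 ((a.length : Int) - 1)) (init := ([] : List String))).symm
    refine h1a.trans ?_
    rw [shift_pyRange]
    have h := PySem.List.foldl_pyRange_pyGetD a ""
      (fun acc v => if v ∉ acc then acc ++ [v] else acc) ([] : List String) (a := 1) (by omega)
    rw [hlen] at h
    exact h
  simp only [mouse_indexes]
  rw [h1]
  have h2 := PySem.List.foldl_pyRange_pyGetD
    ((a.drop 1).foldl (fun acc v => if v ∉ acc then acc ++ [v] else acc) []) ""
    (fun mi s => mi ++ [singMouseID a s]) ([] : List (List Int)) (a := 0) (by omega)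
  refine h2.trans ?_
  rw [Int.toNat_zero, List.drop_zero, PySem.List.foldl_append_singleton_eq_map, List.nil_append]

theorem main_eq (a : List String) : mouse_indexes a = mouse_indexes_alt a := by
  rw [a_side]
  show _ = ((PySem.List.slice a (some 1) none).foldl
      (fun (st : PySem.Set String × List (List Int)) v =>
        if v ∉ st.1 then (st.1.add v, st.2 ++ [(posFold a).getD v []]) else st)
      (PySem.Set.ofList [], [])).2
  rw [PySem.List.slice_from a (by omega), Int.toNat_one,
    bloop (fun v => (posFold a).getD v []) (a.drop 1) (PySem.Set.ofList []) [] []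
      (by intro v; simp) rfl]
  exact List.map_congr_left fun v _ => (getD_posFold a v).symm

-- ===== VERDICT (by name: the statement is the Claim_ definition above) =====
theorem mouse_indexes_spec : Claim_equal_mouse_indexes := by
  intro a _
  unfold Spec_mouse_indexes
  exact main_eq a
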